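-- pv_equiv track=rewrite | github.com/fdanielsouza/CienciasAtuariais | processos_estocasticos.py | matriz_nascimento_morte
-- ===== SOURCE A (Python) =====
-- def matriz_nascimento_morte(la, mu, c, k):
--     return [
--         [
--             - (la if i < k else 0) - (mu * min([i, c])) if i == j else la if i == j + 1 else (mu * min([j, c])) if i == j - 1 else 0
--             for i in range(k + 1)
--         ]
--         for j in range(k + 1)
--     ]
-- ===== SOURCE B (Python) =====
-- def matriz_nascimento_morte(la, mu, c, k):
--     rows = []
--     for j in range(k + 1):
--         full = [0] * j + [mu * min(j, c), -(la if j < k else 0) - mu * min(j, c), la] + [0] * (k - j)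
--         rows.append(full[1:k + 2])
--     return rows
-- ===== Notes on version B (the rewrite author's own statement) =====
-- stated objective: alternative
-- what changed: B builds each row by concatenating a padded three-cell band stencil ([0]*j + [sub, diag, la] + [0]*(k-j)) and cropping it with the slice [1:k+2], so no per-cell conditional (or min) is evaluated, unlike A's nested comprehension that tests every (i,j) cell against a branch chain.
import Mathlib
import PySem

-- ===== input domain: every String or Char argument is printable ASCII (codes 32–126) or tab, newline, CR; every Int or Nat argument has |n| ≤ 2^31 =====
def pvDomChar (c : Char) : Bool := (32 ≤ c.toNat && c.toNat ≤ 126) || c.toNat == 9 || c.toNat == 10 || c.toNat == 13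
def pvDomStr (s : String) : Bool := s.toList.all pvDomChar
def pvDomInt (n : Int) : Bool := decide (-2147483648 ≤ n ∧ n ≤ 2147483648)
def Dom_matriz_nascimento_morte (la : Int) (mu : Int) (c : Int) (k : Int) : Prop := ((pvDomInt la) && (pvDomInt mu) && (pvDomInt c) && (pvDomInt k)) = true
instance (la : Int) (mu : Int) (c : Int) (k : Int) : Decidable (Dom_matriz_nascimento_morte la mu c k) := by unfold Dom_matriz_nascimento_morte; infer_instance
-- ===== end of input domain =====

-- B builds each row from a padded three-cell band stencil cropped by a slice, with no
-- per-cell branching (alternative decomposition; same orders of growth).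

-- ===== PORT A =====
-- literal port of A's nested comprehension over range(k+1) × range(k+1)
def matriz_nascimento_morte (la : Int) (mu : Int) (c : Int) (k : Int) : List (List Int) :=
  (PySem.List.pyRange 0 (k + 1) 1).map (fun j =>
    (PySem.List.pyRange 0 (k + 1) 1).map (fun i =>
      if i = j then - (if i < k then la else 0) - mu * min i c
      else if i = j + 1 then la
      else if i = j - 1 then mu * min j c
      else 0))

-- ===== PORT B =====
-- port of Source B: per row j, full = [0]*j + [sub, diag, la] + [0]*(k-j), row = full[1:k+2];
-- Python's [0]*n is empty for n ≤ 0, matching List.replicate n.toNat.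
def matriz_nascimento_morte_alt (la : Int) (mu : Int) (c : Int) (k : Int) : List (List Int) :=
  (PySem.List.pyRange 0 (k + 1) 1).foldl
    (fun rows j =>
      rows ++ [PySem.List.slice
        (List.replicate j.toNat 0
          ++ [mu * min j c, - (if j < k then la else 0) - mu * min j c, la]
          ++ List.replicate (k - j).toNat 0)
        (some 1) (some (k + 2))])
    []

-- ===== PRECONDITION & SPEC =====
def Spec_matriz_nascimento_morte (la : Int) (mu : Int) (c : Int) (k : Int) (out : List (List Int)) : Prop := out = matriz_nascimento_morte_alt la mu c k
instance (la : Int) (mu : Int) (c : Int) (k : Int) (out : List (List Int)) : Decidable (Spec_matriz_nascimento_morte la mu c k out) := by unfold Spec_matriz_nascimento_morte; infer_instance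

-- ===== CLAIM (what is proved, stated in full; the proofs are below) =====
def Claim_equal_matriz_nascimento_morte : Prop := ∀ (la : Int) (mu : Int) (c : Int) (k : Int), Dom_matriz_nascimento_morte la mu c k → Spec_matriz_nascimento_morte la mu c k (matriz_nascimento_morte la mu c k)

-- ===== LEMMAS AND PROOFS =====

-- closed form of one cell of A's grid (row j, column i), as the Nat-indexed function
def pvEnt (la mu c k : Int) (j i : Nat) : Int :=
  if (i : Int) = (j : Int) then - (if (i : Int) < k then la else 0) - mu * min (i : Int) c
  else if (i : Int) = (j : Int) + 1 then la
  else if (i : Int) = (j : Int) - 1 then mu * min (j : Int) c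
  else 0

theorem pvA_eq (la mu c k : Int) : matriz_nascimento_morte la mu c k
    = (List.range (k + 1).toNat).map (fun j => (List.range (k + 1).toNat).map (pvEnt la mu c k j)) := by
  unfold matriz_nascimento_morte pvEnt
  rw [PySem.List.pyRange_one]
  simp [List.map_map, Function.comp]

-- B's row j (for 0 ≤ j ≤ k) equals row j of A's closed-form grid
theorem pvRow_eq (la mu c k : Int) (j : Nat) (hj : (j : Int) ≤ k) :
    PySem.List.slice
        (List.replicate ((j : Int)).toNat (0 : Int)
          ++ [mu * min (j : Int) c, - (if (j : Int) < k then la else 0) - mu * min (j : Int) c, la]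
          ++ List.replicate (k - (j : Int)).toNat 0)
        (some 1) (some (k + 2))
      = (List.range (k + 1).toNat).map (pvEnt la mu c k j) := by
  have hk : (0 : Int) ≤ k := le_trans (by positivity) hj
  rw [PySem.List.slice_toNat _ (by omega) (by omega)]
  have h1 : ((j : Int)).toNat = j := by omega
  have h2 : (Int.toNat 1) = 1 := by omega
  have h3 : (k + 2).toNat - 1 = k.toNat + 1 := by omega
  have h4 : (k - (j : Int)).toNat = k.toNat - j := by omega
  have h5 : (k + 1).toNat = k.toNat + 1 := by omega
  have hjn : j ≤ k.toNat := by omega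
  rw [h1, h2, h3, h4, h5]
  apply List.ext_getElem
  · simp only [List.length_take, List.length_drop, List.length_append, List.length_replicate,
      List.length_map, List.length_range, List.length_cons, List.length_nil]
    omega
  intro s hs1 hs2
  have hsk : s < k.toNat + 1 := by simpa using hs2
  rw [List.getElem_take, List.getElem_drop, List.getElem_map, List.getElem_range]
  rcases lt_trichotomy (1 + s) j with hlt | heq | hgt
  · rw [List.getElem_append_left (by simp; omega), List.getElem_append_left (by simpa using hlt),
      List.getElem_replicate]
    unfold pvEnt
    rw [if_neg (by omega), if_neg (by omega), if_neg (by omega)]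
  · rw [List.getElem_append_left (by simp; omega), List.getElem_append_right (by simp; omega)]
    have hidx : 1 + s - (List.replicate j (0:Int)).length = 0 := by simp; omega
    simp only [hidx, List.getElem_cons_zero]
    unfold pvEnt
    rw [if_neg (by omega), if_neg (by omega), if_pos (by omega)]
  · rcases Nat.lt_or_ge (1 + s) (j + 3) with hmid | htail
    · rw [List.getElem_append_left (by simp; omega), List.getElem_append_right (by simp; omega)]
      rcases Nat.lt_or_ge (1 + s) (j + 2) with hd | hl
      · have hidx : 1 + s - (List.replicate j (0:Int)).length = 1 := by simp; omega
        simp only [hidx, List.getElem_cons_succ, List.getElem_cons_zero]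
        have hs : s = j := by omega
        subst hs
        unfold pvEnt
        rw [if_pos rfl]
      · have hidx : 1 + s - (List.replicate j (0:Int)).length = 2 := by simp; omega
        simp only [hidx, List.getElem_cons_succ, List.getElem_cons_zero]
        unfold pvEnt
        rw [if_neg (by omega), if_pos (by omega)]
    · rw [List.getElem_append_right (by simp; omega), List.getElem_replicate]
      unfold pvEnt
      rw [if_neg (by omega), if_neg (by omega), if_neg (by omega)]

-- ===== VERDICT (by name: the statement is the Claim_ definition above) =====
theorem matriz_nascimento_morte_spec : Claim_equal_matriz_nascimento_morte := by
  intro la mu c k _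
  unfold Spec_matriz_nascimento_morte matriz_nascimento_morte_alt
  rw [PySem.List.foldl_append_singleton_eq_map, pvA_eq, PySem.List.pyRange_one, List.map_map]
  simp only [List.nil_append, Function.comp_def, zero_add, sub_zero]
  apply List.map_congr_left
  intro j hj
  have hjk : ((j : Int)) ≤ k := by
    have := List.mem_range.mp hj; omega
  exact (pvRow_eq la mu c k j hjk).symm
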